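-- pv_equiv track=rewrite | github.com/MikeHeaton/Sudoku-solver | Solve.py | sub_box
-- ===== SOURCE A (Python) =====
-- def sub_box(x, y):
--     # Returns the coordinates of the box that (x,y) is in, as a list.
--     # Explicit declarations are faster than list comprehensions!
--     TL = [(0, 0), (1, 0), (2, 0),
--           (0, 1), (1, 1), (2, 1),
--           (0, 2), (1, 2), (2, 2)]
--     TM = [(3, 0), (4, 0), (5, 0),
--           (3, 1), (4, 1), (5, 1),
--           (3, 2), (4, 2), (5, 2)]
--     TR = [(6, 0), (7, 0), (8, 0),
--           (6, 1), (7, 1), (8, 1),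
--           (6, 2), (7, 2), (8, 2)]
--     ML = [(0, 3), (1, 3), (2, 3),
--           (0, 4), (1, 4), (2, 4),
--           (0, 5), (1, 5), (2, 5)]
--     MM = [(3, 3), (4, 3), (5, 3),
--           (3, 4), (4, 4), (5, 4),
--           (3, 5), (4, 5), (5, 5)]
--     MR = [(6, 3), (7, 3), (8, 3),
--           (6, 4), (7, 4), (8, 4),
--           (6, 5), (7, 5), (8, 5)]
--     BL = [(0, 6), (1, 6), (2, 6),
--           (0, 7), (1, 7), (2, 7),
--           (0, 8), (1, 8), (2, 8)]
--     BM = [(3, 6), (4, 6), (5, 6),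
--           (3, 7), (4, 7), (5, 7),
--           (3, 8), (4, 8), (5, 8)]
--     BR = [(6, 6), (7, 6), (8, 6),
--           (6, 7), (7, 7), (8, 7),
--           (6, 8), (7, 8), (8, 8)]
--
--     for box in [TL, TM, TR, ML, MM, MR, BL, BM, BR]:
--         if (x, y) in box:
--                 return box
-- ===== SOURCE B (Python) =====
-- def sub_box(x, y):
--     # Arithmetic form: compute the box origin directly instead of scanning 9 lists.
--     if x not in range(9) or y not in range(9):
--         return None
--     ox, oy = (int(x) // 3) * 3, (int(y) // 3) * 3
--     return [(ox + dx, oy + dy) for dy in range(3) for dx in range(3)]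
-- ===== Notes on version B (the rewrite author's own statement) =====
-- stated objective: simpler
-- what changed: Replaces the nine hard-coded 9-tuple lists and the linear membership scan by direct integer arithmetic: the box origin is (x//3*3, y//3*3) and the nine cells are generated by a comprehension.
-- outside the precondition, e.g. on sub_box(9, 0): A returns None, B returns None; on sub_box(-1, 3): A returns None, B returns None
import Mathlib
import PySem

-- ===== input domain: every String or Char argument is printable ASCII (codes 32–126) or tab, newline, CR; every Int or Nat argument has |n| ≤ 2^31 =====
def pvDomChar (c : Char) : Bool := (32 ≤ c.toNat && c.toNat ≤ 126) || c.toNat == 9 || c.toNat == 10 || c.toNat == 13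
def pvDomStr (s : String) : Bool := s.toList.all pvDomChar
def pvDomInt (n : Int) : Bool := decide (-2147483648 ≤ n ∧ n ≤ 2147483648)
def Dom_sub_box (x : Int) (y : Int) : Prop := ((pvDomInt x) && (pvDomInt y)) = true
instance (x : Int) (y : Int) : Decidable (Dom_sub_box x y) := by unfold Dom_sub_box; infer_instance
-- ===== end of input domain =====

-- B replaces A's nine hard-coded cell lists and linear membership scan with direct
-- integer arithmetic on the box origin (objective: simpler).

-- ===== PORT A =====
-- A's nine explicit box lists, in A's iteration order; the loop returning the first
-- box containing (x, y) is List.find?; Python's fall-off-the-end None is the .getD [] placeholder, unreachable under Pre_.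
def sub_box_boxes : List (List (Int × Int)) :=
  [ [(0, 0), (1, 0), (2, 0), (0, 1), (1, 1), (2, 1), (0, 2), (1, 2), (2, 2)],
    [(3, 0), (4, 0), (5, 0), (3, 1), (4, 1), (5, 1), (3, 2), (4, 2), (5, 2)],
    [(6, 0), (7, 0), (8, 0), (6, 1), (7, 1), (8, 1), (6, 2), (7, 2), (8, 2)],
    [(0, 3), (1, 3), (2, 3), (0, 4), (1, 4), (2, 4), (0, 5), (1, 5), (2, 5)],
    [(3, 3), (4, 3), (5, 3), (3, 4), (4, 4), (5, 4), (3, 5), (4, 5), (5, 5)],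
    [(6, 3), (7, 3), (8, 3), (6, 4), (7, 4), (8, 4), (6, 5), (7, 5), (8, 5)],
    [(0, 6), (1, 6), (2, 6), (0, 7), (1, 7), (2, 7), (0, 8), (1, 8), (2, 8)],
    [(3, 6), (4, 6), (5, 6), (3, 7), (4, 7), (5, 7), (3, 8), (4, 8), (5, 8)],
    [(6, 6), (7, 6), (8, 6), (6, 7), (7, 7), (8, 7), (6, 8), (7, 8), (8, 8)] ]

def sub_box (x : Int) (y : Int) : List (Int × Int) :=
  (sub_box_boxes.find? (fun box => box.contains (x, y))).getD []

-- ===== PORT B =====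
def sub_box_alt (x : Int) (y : Int) : List (Int × Int) :=
  if (0 ≤ x ∧ x < 9) ∧ (0 ≤ y ∧ y < 9) then
    let ox := (PySem.Int.floordiv x 3) * 3
    let oy := (PySem.Int.floordiv y 3) * 3
    ((List.range 3).map Int.ofNat).flatMap (fun dy =>
      ((List.range 3).map Int.ofNat).map (fun dx => (ox + dx, oy + dy)))
  else []

-- ===== PRECONDITION & SPEC =====
-- Pre_ excludes inputs outside the 9x9 grid, where Python A falls off the loop and
-- returns None — no value of the declared list type (B also returns None there).
def Pre_sub_box (x : Int) (y : Int) : Prop := 0 ≤ x ∧ x < 9 ∧ 0 ≤ y ∧ y < 9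
instance (x : Int) (y : Int) : Decidable (Pre_sub_box x y) := by unfold Pre_sub_box; infer_instance
def pvWitness_sub_box : Int × Int := (2, 5)

def Spec_sub_box (x : Int) (y : Int) (out : List (Int × Int)) : Prop := out = sub_box_alt x y
instance (x : Int) (y : Int) (out : List (Int × Int)) : Decidable (Spec_sub_box x y out) := by unfold Spec_sub_box; infer_instance

-- ===== CLAIM (what is proved, stated in full; the proofs are below) =====
def Claim_equal_sub_box : Prop := ∀ (x : Int) (y : Int), Dom_sub_box x y → Pre_sub_box x y → Spec_sub_box x y (sub_box x y)

-- ===== LEMMAS AND PROOFS =====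
-- ===== VERDICT (by name: the statement is the Claim_ definition above) =====
theorem sub_box_spec : Claim_equal_sub_box := by
  intro x y _ hp
  obtain ⟨hx0, hx8, hy0, hy8⟩ := hp
  unfold Spec_sub_box
  interval_cases x <;> interval_cases y <;> decide
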